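-- pv_equiv track=rewrite | github.com/benoitkugler/A_Tale_of_Sand_and_Snow | dev_tools/outils_carac/onglet_heros.py | doublons_cfg
-- ===== SOURCE A (Python) =====
-- def doublons_cfg(l):
--     s = []
--     r= []
--     for j in l:
--         s.append(j[0:-5])
--
--     for j in s:
--         if not(j in r):
--             r.append(j)
--     return sorted(r)
-- ===== SOURCE B (Python) =====
-- def doublons_cfg(l):
--     t = [j[:-5] for j in l]
--     t.sort()
--     r = []
--     for x in t:
--         if not r or r[-1] != x:
--             r.append(x)
--     return r
-- ===== Notes on version B (the rewrite author's own statement) =====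
-- stated objective: alternative
-- what changed: Replaces the membership-list dedup followed by a final sort with a sort-first pipeline: truncate, sort once, then one linear pass dropping adjacent duplicates.
import Mathlib
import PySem

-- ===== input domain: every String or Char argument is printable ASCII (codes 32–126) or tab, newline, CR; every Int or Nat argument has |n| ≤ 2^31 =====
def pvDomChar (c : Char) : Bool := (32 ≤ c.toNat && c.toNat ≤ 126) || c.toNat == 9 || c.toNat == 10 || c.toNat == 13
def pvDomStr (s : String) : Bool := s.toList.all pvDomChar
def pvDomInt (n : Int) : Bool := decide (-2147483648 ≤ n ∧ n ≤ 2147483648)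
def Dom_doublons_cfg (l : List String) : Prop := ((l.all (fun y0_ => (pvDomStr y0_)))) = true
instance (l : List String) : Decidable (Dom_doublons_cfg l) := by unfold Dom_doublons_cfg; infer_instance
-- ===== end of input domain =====

-- B sorts the truncated strings once and removes adjacent duplicates in one linear pass,
-- instead of A's membership-list dedup followed by a sort (alternative decomposition, same measured cost).

-- ===== PORT A =====
def doublons_cfg (l : List String) : List String :=
  -- s = []; for j in l: s.append(j[0:-5])
  let s := l.foldl (fun s j => s ++ [PySem.Str.slice j (some 0) (some (-5))]) []
  -- r = []; for j in s: if not (j in r): r.append(j)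
  let r := s.foldl (fun r j => if j ∈ r then r else r ++ [j]) []
  PySem.List.sorted r (fun x => x) false

-- ===== PORT B =====
def doublons_cfg_alt (l : List String) : List String :=
  -- t = [j[:-5] for j in l]; t.sort()
  let t := l.map (fun j => PySem.Str.slice j none (some (-5)))
  let ss := PySem.List.sorted t (fun x => x) false
  -- r = []; for x in ss: if not r or r[-1] != x: r.append(x)
  ss.foldl (fun r x => if r = [] ∨ PySem.List.pyGet? r (-1) ≠ some x then r ++ [x] else r) []

-- ===== PRECONDITION & SPEC =====
def Spec_doublons_cfg (l : List String) (out : List String) : Prop := out = doublons_cfg_alt l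
instance (l : List String) (out : List String) : Decidable (Spec_doublons_cfg l out) := by unfold Spec_doublons_cfg; infer_instance

-- ===== CLAIM (what is proved, stated in full; the proofs are below) =====
def Claim_equal_doublons_cfg : Prop := ∀ (l : List String), Dom_doublons_cfg l → Spec_doublons_cfg l (doublons_cfg l)

-- ===== LEMMAS AND PROOFS =====

-- abstract form of B's adjacent-duplicate pass, threaded by "last appended element"
def pvDestutter (m : Option String) : List String → List String
  | [] => []
  | x :: xs => if some x = m then pvDestutter m xs else x :: pvDestutter (some x) xs

theorem pvFoldB_eq_destutter (xs acc : List String) :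
    xs.foldl (fun r x => if r = [] ∨ PySem.List.pyGet? r (-1) ≠ some x then r ++ [x] else r) acc
      = acc ++ pvDestutter acc.getLast? xs := by
  induction xs generalizing acc with
  | nil => simp [pvDestutter]
  | cons x xs ih =>
    by_cases h : acc.getLast? = some x
    · have hacc : acc ≠ [] := by intro he; simp [he] at h
      have hcond : ¬ (acc = [] ∨ PySem.List.pyGet? acc (-1) ≠ some x) := by
        simp [PySem.List.pyGet?_neg_one, h, hacc]
      rw [List.foldl_cons, if_neg hcond, ih acc, pvDestutter, if_pos h.symm]
    · have hcond : (acc = [] ∨ PySem.List.pyGet? acc (-1) ≠ some x) := by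
        by_cases he : acc = []
        · exact Or.inl he
        · exact Or.inr (by simpa [PySem.List.pyGet?_neg_one] using h)
      rw [List.foldl_cons, if_pos hcond, ih (acc ++ [x])]
      have hl : (acc ++ [x]).getLast? = some x := by simp
      rw [hl, pvDestutter, if_neg (fun he => h he.symm)]
      simp [List.append_assoc]

theorem pvDestutter_spec (xs : List String) (hs : xs.Pairwise (· ≤ ·)) :
    ∀ (m : Option String), (∀ a, m = some a → ∀ y ∈ xs, a ≤ y) →
      (pvDestutter m xs).Pairwise (· < ·) ∧
      (∀ y, y ∈ pvDestutter m xs ↔ y ∈ xs ∧ m ≠ some y) := by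
  induction xs with
  | nil => intro m _; simp [pvDestutter]
  | cons x xs ih =>
    intro m hm
    have h1 : ∀ y ∈ xs, x ≤ y := fun y hy => List.rel_of_pairwise_cons hs hy
    have hs' := List.Pairwise.of_cons hs
    by_cases h : some x = m
    · -- skip x : m = some x
      have ⟨ihp, ihm⟩ := ih hs' m (fun a ha y hy => hm a ha y (List.mem_cons_of_mem _ hy))
      refine ⟨by simpa [pvDestutter, h] using ihp, ?_⟩
      intro y
      rw [pvDestutter, if_pos h, ihm y]
      constructor
      · rintro ⟨hy, hne⟩; exact ⟨List.mem_cons_of_mem _ hy, hne⟩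
      · rintro ⟨hy, hne⟩
        rcases List.mem_cons.mp hy with rfl | hy
        · exact absurd h.symm hne
        · exact ⟨hy, hne⟩
    · -- keep x
      have ⟨ihp, ihm⟩ := ih hs' (some x) (by rintro a ⟨rfl⟩; exact h1)
      constructor
      · rw [pvDestutter, if_neg h]
        refine List.pairwise_cons.mpr ⟨?_, ihp⟩
        intro y hy
        have := (ihm y).mp hy
        exact lt_of_le_of_ne (h1 y this.1) (fun he => this.2 (by rw [he]))
      · intro y
        rw [pvDestutter, if_neg h, List.mem_cons, ihm y]
        constructor
        · rintro (rfl | ⟨hy, hne⟩)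
          · exact ⟨List.mem_cons_self, fun he => h he.symm⟩
          · refine ⟨List.mem_cons_of_mem _ hy, ?_⟩
            rintro rfl
            have hyx := hm y rfl x List.mem_cons_self
            exact (hne (by rw [le_antisymm hyx (h1 y hy)])).elim
        · rintro ⟨hy, hne⟩
          rcases List.mem_cons.mp hy with rfl | hy
          · exact Or.inl rfl
          · by_cases hxy : x = y
            · exact Or.inl hxy.symm
            · exact Or.inr ⟨hy, fun he => hxy (Option.some_injective _ he)⟩

-- A's second loop: nodup and membership
theorem pvFoldA_spec (xs acc : List String) (hacc : acc.Nodup) :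
    (xs.foldl (fun r j => if j ∈ r then r else r ++ [j]) acc).Nodup ∧
    (∀ y, y ∈ xs.foldl (fun r j => if j ∈ r then r else r ++ [j]) acc ↔ y ∈ acc ∨ y ∈ xs) := by
  induction xs generalizing acc with
  | nil => simp [hacc]
  | cons x xs ih =>
    by_cases h : x ∈ acc
    · have ⟨hn, hmem⟩ := ih acc hacc
      refine ⟨by simpa [h] using hn, ?_⟩
      intro y
      simp only [List.foldl_cons, if_pos h]
      rw [hmem y, List.mem_cons]
      constructor
      · rintro (hy | hy); exacts [Or.inl hy, Or.inr (Or.inr hy)]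
      · rintro (hy | rfl | hy); exacts [Or.inl hy, Or.inl h, Or.inr hy]
    · have hacc' : (acc ++ [x]).Nodup := by
        simp [List.nodup_append, hacc]
        exact fun a ha he => h (he ▸ ha)
      have ⟨hn, hmem⟩ := ih (acc ++ [x]) hacc'
      refine ⟨by simpa [h] using hn, ?_⟩
      intro y
      simp only [List.foldl_cons, if_neg h]
      rw [hmem y]
      simp [List.mem_append, List.mem_cons, or_assoc]

-- A's first loop builds the same truncated list B maps ([0:-5] = [:-5])
theorem pvTrunc_eq (l : List String) :
    l.foldl (fun s j => s ++ [PySem.Str.slice j (some 0) (some (-5))]) []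
      = l.map (fun j => PySem.Str.slice j none (some (-5))) := by
  rw [PySem.List.foldl_append_singleton_eq_map]
  exact List.map_congr_left (fun a _ => by simp [PySem.Str.slice])

-- ===== VERDICT (by name: the statement is the Claim_ definition above) =====
theorem doublons_cfg_spec : Claim_equal_doublons_cfg := by
  intro l _
  unfold Spec_doublons_cfg doublons_cfg doublons_cfg_alt
  rw [pvTrunc_eq]
  set t := l.map (fun j => PySem.Str.slice j none (some (-5))) with ht
  set ss := PySem.List.sorted t (fun x => x) false with hss
  have hssp : ss.Pairwise (· ≤ ·) := by
    simpa using PySem.List.sorted_pairwise t (fun x => x)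
  have hperm : ss.Perm t := PySem.List.sorted_perm t (fun x => x) false
  have ⟨hDp, hDm⟩ := pvDestutter_spec ss hssp none (by simp)
  have ⟨hAn, hAm⟩ := pvFoldA_spec t [] List.nodup_nil
  rw [pvFoldB_eq_destutter]
  simp only [List.getLast?_nil, List.nil_append]
  apply PySem.List.sorted_eq_of_perm_of_pairwise_lt
  · apply (List.perm_ext_iff_of_nodup (hDp.imp ne_of_lt) hAn).mpr
    intro a
    rw [hDm a, hAm a]
    simp [hperm.mem_iff]
  · simpa using hDp
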